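-- pv_equiv track=rewrite | github.com/facundoschillino/TP_IA_GRUPO1 | entrega1.py | result
-- ===== SOURCE A (Python) =====
-- def result(state, action):
--     origen,destino = action
--     state = list(state)
--     frasco_origen = list(state[origen])
--     frasco_destino = list(state[destino])
--     color_a_trasvasar = frasco_origen[len(frasco_origen)-1]
--     cantidad_al_final = 0
--     for color in frasco_origen:
--         if color == color_a_trasvasar:
--             cantidad_al_final += 1
--         else:
--             cantidad_al_final = 0
--     #Hasta acá lo que hice fue ver cuantas unidades de ese color tengo al final, osea, cuantas puedo trasvasar.
--     if (len(frasco_destino) == 0): ##Este es para trasvasar a uno vacio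
--          for _ in range(cantidad_al_final):
--             color_sustraido = frasco_origen.pop()
--             frasco_destino.append(color_sustraido)
--     else: #Este es para cuando destino no esta vacio y tengo que contar cuantos puedo trasvasar
--          faltante_destino = 4 - len(frasco_destino)
--          if (faltante_destino >= cantidad_al_final):
--             for _ in range(cantidad_al_final):
--                 color_sustraido = frasco_origen.pop()
--                 frasco_destino.append(color_sustraido)
--          else:
--               while (len(frasco_destino) < 4):
--                 color_sustraido = frasco_origen.pop()
--                 frasco_destino.append(color_sustraido)
--     frasco_origen = tuple(frasco_origen)
--     frasco_destino = tuple(frasco_destino)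
--     state[origen] = frasco_origen
--     state[destino] = frasco_destino
--     return tuple(state)
-- ===== SOURCE B (Python) =====
-- def result(state, action):
--     origen, destino = action
--     frasco_origen = list(state[origen])
--     frasco_destino = list(state[destino])
--     top = frasco_origen[-1]
--     # trailing run of the top colour, by a reverse scan with early exit
--     run = 0
--     for color in reversed(frasco_origen):
--         if color != top:
--             break
--         run += 1
--     # closed-form amount: everything fits into an empty flask, else capped by free space
--     if frasco_destino:
--         amount = min(run, max(0, 4 - len(frasco_destino)))
--     else:
--         amount = run
--     nuevo = list(state)
--     nuevo[origen] = tuple(frasco_origen[:len(frasco_origen) - amount])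
--     nuevo[destino] = tuple(frasco_destino + [top] * amount)
--     return tuple(nuevo)
-- ===== Notes on version B (the rewrite author's own statement) =====
-- stated objective: simpler
-- what changed: B computes the trailing run by a reverse scan with early exit, collapses A's empty/fits/overflow branch tree into one closed-form amount = run (empty target) or min(run, max(0, 4-len(target))), and transfers by slicing/concatenation instead of A's pop/append loops.
import Mathlib
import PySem

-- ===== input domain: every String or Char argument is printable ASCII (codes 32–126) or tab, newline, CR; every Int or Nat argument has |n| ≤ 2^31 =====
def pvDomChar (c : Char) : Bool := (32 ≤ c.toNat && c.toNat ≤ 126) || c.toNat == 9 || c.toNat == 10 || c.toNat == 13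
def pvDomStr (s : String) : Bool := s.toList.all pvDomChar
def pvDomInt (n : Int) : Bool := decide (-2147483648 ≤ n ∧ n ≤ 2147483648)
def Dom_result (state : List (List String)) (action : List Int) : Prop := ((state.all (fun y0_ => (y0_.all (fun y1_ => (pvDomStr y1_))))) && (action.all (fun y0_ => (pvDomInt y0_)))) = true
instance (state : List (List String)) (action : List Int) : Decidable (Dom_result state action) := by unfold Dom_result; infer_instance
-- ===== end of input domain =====

-- B replaces A's empty/fits/overflow branch tree and pop/append loops by a reverse scan
-- for the trailing run, a closed-form pour amount, and slice/concatenation; equal on Pre_.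

-- ===== PORT A =====
-- 'for _ in range(n): color_sustraido = frasco_origen.pop(); frasco_destino.append(color_sustraido)'
def pourN : Nat → List String × List String → List String × List String
  | 0, st => st
  | n + 1, (fo, fd) =>
    match PySem.List.pop? fo (-1) with
    | none => (fo, fd)          -- Python raises IndexError here; excluded by Pre_result
    | some (c, fo') => pourN n (fo', fd ++ [c])

-- 'while len(frasco_destino) < 4: color_sustraido = frasco_origen.pop(); frasco_destino.append(color_sustraido)'
def pourWhile (fo fd : List String) : List String × List String :=
  if fd.length < 4 then
    match PySem.List.pop? fo (-1) with
    | none => (fo, fd)          -- Python raises IndexError here; excluded by Pre_result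
    | some (c, fo') => pourWhile fo' (fd ++ [c])
  else (fo, fd)
termination_by 4 - fd.length
decreasing_by simp_all; omega

def result (state : List (List String)) (action : List Int) : List (List String) :=
  match action with
  | [origen, destino] =>
    let frasco_origen := (PySem.List.pyGet? state origen).getD []
    let frasco_destino := (PySem.List.pyGet? state destino).getD []
    match PySem.List.pyGet? frasco_origen (PySem.List.len frasco_origen - 1) with
    | none => []                -- IndexError on empty origin flask; excluded by Pre_result
    | some color_a_trasvasar =>
      let cantidad_al_final : Int :=
        frasco_origen.foldl (fun acc color => if color = color_a_trasvasar then acc + 1 else 0) 0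
      let pair :=
        if frasco_destino.length = 0 then
          pourN cantidad_al_final.toNat (frasco_origen, frasco_destino)
        else
          let faltante_destino : Int := 4 - PySem.List.len frasco_destino
          if faltante_destino ≥ cantidad_al_final then
            pourN cantidad_al_final.toNat (frasco_origen, frasco_destino)
          else
            pourWhile frasco_origen frasco_destino
      PySem.List.pySetD (PySem.List.pySetD state origen pair.1) destino pair.2
  | _ => []                     -- unpacking raises ValueError; excluded by Pre_result

-- ===== PORT B =====
-- 'run = 0; for color in reversed(frasco_origen): if color != top: break; run += 1'
def runRev (top : String) : List String → Nat
  | [] => 0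
  | c :: rest => if c = top then runRev top rest + 1 else 0

def result_alt (state : List (List String)) (action : List Int) : List (List String) :=
  if action.length ≠ 2 then []      -- unpacking raises ValueError; excluded by Pre_result
  else
    let origen := action.getD 0 0
    let destino := action.getD 1 0
    let fo := (PySem.List.pyGet? state origen).getD []
    let fd := (PySem.List.pyGet? state destino).getD []
    ((PySem.List.pyGet? fo (-1)).map (fun top =>
      let run := runRev top fo.reverse
      -- Nat subtraction 4 - fd.length is Python's max(0, 4 - len(fd))
      let amount := if fd = [] then run else min run (4 - fd.length)
      let nuevo := PySem.List.pySetD state origen (fo.take (fo.length - amount))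
      PySem.List.pySetD nuevo destino (fd ++ List.replicate amount top))).getD []
      -- none case = IndexError on empty origin flask; excluded by Pre_result

-- ===== PRECONDITION & SPEC =====
-- Pre_result: exactly where Python A returns: the action is a pair of in-range flask
-- indices (negative Python indexing allowed) and the origin flask is nonempty.
def Pre_result (state : List (List String)) (action : List Int) : Prop :=
  action.length = 2 ∧
  PySem.Raise.InRange state.length (action.getD 0 0) ∧
  PySem.Raise.InRange state.length (action.getD 1 0) ∧
  (PySem.List.pyGet? state (action.getD 0 0)).getD [] ≠ []
instance (state : List (List String)) (action : List Int) : Decidable (Pre_result state action) := by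
  unfold Pre_result; infer_instance

def pvWitness_result : List (List String) × List Int := ([["r", "r"], ["b"]], [0, 1])

def Spec_result (state : List (List String)) (action : List Int) (out : List (List String)) : Prop := out = result_alt state action
instance (state : List (List String)) (action : List Int) (out : List (List String)) : Decidable (Spec_result state action out) := by unfold Spec_result; infer_instance

-- ===== CLAIM (what is proved, stated in full; the proofs are below) =====
def Claim_equal_result : Prop := ∀ (state : List (List String)) (action : List Int), Dom_result state action → Pre_result state action → Spec_result state action (result state action)

-- ===== LEMMAS AND PROOFS =====

-- A's reset-counter foldl computes B's reverse-scan trailing run.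
theorem foldl_reset_eq_runRev (fo : List String) (top : String) :
    fo.foldl (fun acc color => if color = top then acc + 1 else 0) (0 : Int)
      = (runRev top fo.reverse : Int) := by
  induction fo using List.reverseRecOn with
  | nil => simp [runRev]
  | append_singleton xs x ih =>
      simp [List.foldl_append, runRev]
      by_cases h : x = top <;> simp [h, ih]

-- Trailing-run decomposition: fo splits as a prefix ++ run copies of top.
theorem runRev_decompose (top : String) (fo : List String) :
    ∃ g, fo = g ++ List.replicate (runRev top fo.reverse) top := by
  induction fo using List.reverseRecOn with
  | nil => exact ⟨[], by simp [runRev]⟩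
  | append_singleton xs x ih =>
      by_cases h : x = top
      · subst h
        obtain ⟨g, hg⟩ := ih
        refine ⟨g, ?_⟩
        have hstep : runRev x (xs ++ [x]).reverse = runRev x xs.reverse + 1 := by
          simp [runRev]
        rw [hstep, List.replicate_succ', ← List.append_assoc, ← hg]
      · exact ⟨xs ++ [x], by simp [runRev, h]⟩

-- n pops from the trailing run move n copies of top across.
theorem pourN_eq (top : String) (g : List String) (m n : Nat) (fd : List String) (h : n ≤ m) :
    pourN n (g ++ List.replicate m top, fd)
      = (g ++ List.replicate (m - n) top, fd ++ List.replicate n top) := by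
  induction n generalizing m fd with
  | zero => simp [pourN]
  | succ n ih =>
      obtain ⟨m', rfl⟩ : ∃ m', m = m' + 1 := ⟨m - 1, by omega⟩
      have hsplit : g ++ List.replicate (m' + 1) top = (g ++ List.replicate m' top) ++ [top] := by
        simp [List.replicate_succ']
      rw [pourN, hsplit, PySem.List.pop?_last]
      show pourN n (g ++ List.replicate m' top, fd ++ [top]) = _
      rw [ih m' (fd ++ [top]) (by omega)]
      have hmn : m' + 1 - (n + 1) = m' - n := by omega
      rw [hmn]
      simp [List.replicate_succ]

-- The while-loop pours exactly 4 - len(fd) times when the origin has that many units.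
theorem pourWhile_eq_pourN (fo fd : List String) (h : 4 - fd.length ≤ fo.length) :
    pourWhile fo fd = pourN (4 - fd.length) (fo, fd) := by
  by_cases h4 : fd.length < 4
  · have hfo : fo ≠ [] := by
      intro hnil; rw [hnil] at h; simp at h; omega
    obtain ⟨fo', c, rfl⟩ : ∃ ys y, fo = ys ++ [y] :=
      ⟨fo.dropLast, fo.getLast hfo, (List.dropLast_append_getLast hfo).symm⟩
    rw [pourWhile]
    simp only [h4, if_true, PySem.List.pop?_last]
    have hk : 4 - fd.length = (4 - (fd ++ [c]).length) + 1 := by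
      simp; omega
    rw [hk, pourN, PySem.List.pop?_last,
        pourWhile_eq_pourN fo' (fd ++ [c]) (by simp at h ⊢; omega)]
  · rw [pourWhile]
    simp only [h4, if_false]
    have : 4 - fd.length = 0 := by omega
    rw [this, pourN]
termination_by 4 - fd.length
decreasing_by simp; omega

-- run ≤ length of the origin flask
theorem runRev_le_length (top : String) (fo : List String) :
    runRev top fo.reverse ≤ fo.length := by
  obtain ⟨g, hg⟩ := runRev_decompose top fo
  conv_rhs => rw [hg]
  simp

-- ===== VERDICT (by name: the statement is the Claim_ definition above) =====
theorem result_spec : Claim_equal_result := by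
  intro state action _ hpre
  obtain ⟨hlen, hio, hid, hne⟩ := hpre
  match action, hlen with
  | [origen, destino], _ =>
    simp only [List.getD, List.getElem?_cons_zero, List.getElem?_cons_succ, Option.getD_some] at hio hid hne
    obtain ⟨fo, hfo⟩ : ∃ fo, PySem.List.pyGet? state origen = some fo := by
      cases h : PySem.List.pyGet? state origen with
      | none => rw [PySem.List.pyGet?_eq_none_iff] at h; exact absurd hio h
      | some fo => exact ⟨fo, rfl⟩
    obtain ⟨fd, hfd⟩ : ∃ fd, PySem.List.pyGet? state destino = some fd := by
      cases h : PySem.List.pyGet? state destino with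
      | none => rw [PySem.List.pyGet?_eq_none_iff] at h; exact absurd hid h
      | some fd => exact ⟨fd, rfl⟩
    rw [hfo] at hne
    simp only [Option.getD_some] at hne
    have hlen1 : 1 ≤ fo.length := List.length_pos_iff.mpr hne
    have htopB : PySem.List.pyGet? fo (-1) = some (fo.getLast hne) := by
      rw [PySem.List.pyGet?_neg_one, List.getLast?_eq_some_getLast (h := hne)]
    have htopA : PySem.List.pyGet? fo (PySem.List.len fo - 1) = some (fo.getLast hne) := by
      have h1 : PySem.List.len fo - 1 = ((fo.length - 1 : Nat) : Int) := by
        rw [PySem.List.len_eq]; omega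
      rw [h1, PySem.List.pyGet?_natCast, ← List.getLast?_eq_getElem?,
        List.getLast?_eq_some_getLast (h := hne)]
    set top := fo.getLast hne with htop
    set r := runRev top fo.reverse with hr
    have hrle := runRev_le_length top fo
    obtain ⟨g, hg⟩ := runRev_decompose top fo
    rw [← hr] at hrle hg
    have hglen : fo.length = g.length + r := by rw [hg]; simp
    -- the amount B pours
    set a := if fd = [] then r else min r (4 - fd.length) with ha
    have hale : a ≤ r := by rw [ha]; split <;> omega
    -- A's branch tree produces exactly pourN a
    have hbranch :
        (if fd.length = 0 then
          pourN (r : Int).toNat (fo, fd)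
        else if (4 : Int) - PySem.List.len fd ≥ (r : Int) then
          pourN (r : Int).toNat (fo, fd)
        else pourWhile fo fd)
        = (fo.take (fo.length - a), fd ++ List.replicate a top) := by
      have hpour : ∀ n : Nat, n ≤ r →
          pourN n (fo, fd) = (fo.take (fo.length - n), fd ++ List.replicate n top) := by
        intro n hn
        rw [hg, pourN_eq top g r n fd hn]
        congr 1
        have : (g ++ List.replicate r top).length - n = g.length + (r - n) := by
          simp; omega
        rw [this, List.take_append, List.take_of_length_le (by omega), List.take_replicate]
        have h2 : min (g.length + (r - n) - g.length) r = r - n := by omega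
        rw [h2]
      rw [PySem.List.len_eq, Int.toNat_natCast]
      by_cases h0 : fd = []
      · have : fd.length = 0 := by simp [h0]
        simp only [this, if_true]
        rw [hpour r le_rfl]; simp [ha, h0]
      · have hlfd : fd.length ≠ 0 := by simpa using h0
        simp only [hlfd, if_false]
        by_cases hfit : (4 : Int) - fd.length ≥ (r : Int)
        · simp only [hfit, if_true]
          rw [hpour r le_rfl]
          have : a = r := by rw [ha]; simp only [h0, if_false]; omega
          rw [this]
        · simp only [hfit, if_false]
          have hk : a = 4 - fd.length := by rw [ha]; simp only [h0, if_false]; omega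
          rw [pourWhile_eq_pourN fo fd (by omega), hpour (4 - fd.length) (by omega), ← hk]
    unfold Spec_result result result_alt
    simp only [hfo, hfd, Option.getD_some, htopA, htopB, foldl_reset_eq_runRev, ← hr,
      hbranch, List.length_cons, List.length_nil, List.getD, List.getElem?_cons_zero,
      List.getElem?_cons_succ, Option.map_some, ne_eq, ite_not]
    rw [← ha]
    simp
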